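-- pv_equiv track=rewrite | github.com/non-Jedi/gyr | gyr/utils.py | is_full_mxid
-- ===== SOURCE A (Python) =====
-- from string import ascii_lowercase, digits
--
-- def is_full_mxid(user_string):
--     """Returns True if a string is a valid mxid."""
--     if not user_string[0] == "@":
--         return False
--     parts = user_string[1:].split(":")
--     localpart_chars = ascii_lowercase + digits + "._-="
--     if not (len(parts) == 2 and all([i in localpart_chars for i in parts[0]])):
--         return False
--     return True
-- ===== SOURCE B (Python) =====
-- LOCALPART_CHARS = frozenset("abcdefghijklmnopqrstuvwxyz0123456789._-=")
--
-- def is_full_mxid(user_string):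
--     """Returns True if a string is a valid mxid."""
--     if user_string[0] != "@":
--         return False
--     i, n = 1, len(user_string)
--     while i < n and user_string[i] in LOCALPART_CHARS:
--         i += 1
--     return i < n and user_string[i] == ":" and ":" not in user_string[i + 1:]
-- ===== Notes on version B (the rewrite author's own statement) =====
-- stated objective: alternative
-- what changed: Replaces the slice + split-on-colon + per-character list-comprehension membership test with a single left-to-right scan that skips localpart characters and then checks that the first non-localpart character is the only colon.
-- outside the precondition, e.g. on is_full_mxid(''): A raises IndexError, B raises IndexError
import Mathlib
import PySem

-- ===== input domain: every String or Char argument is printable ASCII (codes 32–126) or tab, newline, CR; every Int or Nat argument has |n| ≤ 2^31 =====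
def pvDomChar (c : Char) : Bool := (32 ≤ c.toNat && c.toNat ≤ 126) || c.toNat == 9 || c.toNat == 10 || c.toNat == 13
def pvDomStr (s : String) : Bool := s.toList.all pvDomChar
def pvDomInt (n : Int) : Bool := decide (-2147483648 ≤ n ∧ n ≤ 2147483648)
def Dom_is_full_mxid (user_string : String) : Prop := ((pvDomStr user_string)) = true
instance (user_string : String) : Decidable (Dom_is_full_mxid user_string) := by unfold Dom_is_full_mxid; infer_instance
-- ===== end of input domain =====

-- B replaces split-on-colon + per-character list comprehension by one left-to-right scan; same cost, different decomposition.
-- ===== PORT A =====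
-- ascii_lowercase + digits + "._-="
def pvLocalpartChars : List Char := "abcdefghijklmnopqrstuvwxyz0123456789._-=".toList

def is_full_mxid (user_string : String) : Bool :=
  -- if not user_string[0] == "@": return False
  match PySem.Str.pyGet? user_string 0 with
  | none => false  -- IndexError on the empty string; excluded by Pre_
  | some c0 =>
    if !(c0 == '@') then false
    else
      -- parts = user_string[1:].split(":")
      let parts := PySem.Chars.splitOn (PySem.List.slice user_string.toList (some 1) none) [':']
      -- `i in localpart_chars` for a 1-char string i is char membership: List.contains is exact here
      if !((parts.length == 2) && (PySem.List.pyGetD parts 0 []).all (fun i => pvLocalpartChars.contains i)) then false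
      else true

-- ===== PORT B =====
def pvIsLocalChar (c : Char) : Bool := "abcdefghijklmnopqrstuvwxyz0123456789._-=".toList.contains c

-- the while loop `while i < n and user_string[i] in LOCALPART_CHARS: i += 1`, returning the suffix from i
def pvDropLocal : List Char → List Char
  | [] => []
  | c :: cs => if pvIsLocalChar c then pvDropLocal cs else c :: cs

def is_full_mxid_alt (user_string : String) : Bool :=
  match user_string.toList with
  | [] => false  -- user_string[0] raises IndexError; excluded by Pre_
  | c0 :: rest =>
    if c0 != '@' then false
    else
      match pvDropLocal rest with
      | [] => false  -- i == n
      | d :: tail => d == ':' && !(tail.contains ':')  -- single-char `in` is char membership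

-- ===== PRECONDITION & SPEC =====
-- Pre_ excludes only the empty string, on which both Pythons raise IndexError at user_string[0].
def Pre_is_full_mxid (user_string : String) : Prop := user_string ≠ ""
instance (user_string : String) : Decidable (Pre_is_full_mxid user_string) := by unfold Pre_is_full_mxid; infer_instance
def pvWitness_is_full_mxid : String := "@a:b"

def Spec_is_full_mxid (user_string : String) (out : Bool) : Prop := out = is_full_mxid_alt user_string
instance (user_string : String) (out : Bool) : Decidable (Spec_is_full_mxid user_string out) := by unfold Spec_is_full_mxid; infer_instance

-- ===== CLAIM (what is proved, stated in full; the proofs are below) =====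
def Claim_equal_is_full_mxid : Prop := ∀ (user_string : String), Dom_is_full_mxid user_string → Pre_is_full_mxid user_string → Spec_is_full_mxid user_string (is_full_mxid user_string)

-- ===== LEMMAS AND PROOFS =====

-- (first piece, remaining pieces) of splitting on ':'
def pvPieces : List Char → List Char × List (List Char)
  | [] => ([], [])
  | c :: cs => if c = ':' then ([], (pvPieces cs).1 :: (pvPieces cs).2) else (c :: (pvPieces cs).1, (pvPieces cs).2)

theorem pvGo_eq (fuel : Nat) (l cur : List Char) (acc : List (List Char)) (h : l.length < fuel) :
    PySem.Chars.splitOn.go [':'] fuel l cur acc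
      = acc.reverse ++ (cur.reverse ++ (pvPieces l).1) :: (pvPieces l).2 := by
  induction fuel generalizing l cur acc with
  | zero => omega
  | succ fuel ih =>
    cases l with
    | nil => simp [PySem.Chars.splitOn.go, pvPieces]
    | cons c cs =>
      by_cases hc : c = ':'
      · subst hc
        simp only [PySem.Chars.splitOn.go, List.isPrefixOf, beq_self_eq_true, Bool.true_and,
          List.length_cons, List.drop_succ_cons]
        simp only [List.length_nil, List.drop_zero]
        rw [ih cs [] (cur.reverse :: acc) (by simpa using Nat.lt_of_succ_lt_succ h)]
        simp [pvPieces]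
      · simp only [PySem.Chars.splitOn.go, List.isPrefixOf, Bool.and_true]
        rw [if_neg (by simp [Ne.symm hc]), ih cs (c :: cur) acc (by simpa using Nat.lt_of_succ_lt_succ h)]
        simp [pvPieces, hc]

theorem pvSplitOn_eq (l : List Char) :
    PySem.Chars.splitOn l [':'] = (pvPieces l).1 :: (pvPieces l).2 := by
  unfold PySem.Chars.splitOn
  rw [pvGo_eq (l.length + 1) l [] [] (Nat.lt_succ_self _)]
  simp

theorem pvPieces_snd_nil_iff (l : List Char) :
    (pvPieces l).2 = [] ↔ l.contains ':' = false := by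
  induction l with
  | nil => simp [pvPieces]
  | cons c cs ih =>
    by_cases hc : c = ':'
    · subst hc; simp [pvPieces]
    · simp [pvPieces, hc, Ne.symm hc, ih]

theorem pvKey (l : List Char) :
    ((((pvPieces l).1 :: (pvPieces l).2).length == 2)
        && ((pvPieces l).1.all (fun i => pvLocalpartChars.contains i)))
      = (match pvDropLocal l with
         | [] => false
         | d :: tail => d == ':' && !(tail.contains ':')) := by
  induction l with
  | nil => simp [pvPieces, pvDropLocal]
  | cons c cs ih =>
    by_cases hc : c = ':'
    · subst hc
      have hloc : pvIsLocalChar ':' = false := by decide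
      simp only [pvPieces, pvDropLocal, hloc, if_neg Bool.false_ne_true]
      simp only [List.length_cons, beq_self_eq_true, Bool.true_and]
      by_cases h2 : (pvPieces cs).2 = []
      · have hmem : ':' ∉ cs := by simpa using (pvPieces_snd_nil_iff cs).mp h2
        simp [h2, hmem]
      · have : cs.contains ':' = true := by
          cases h : cs.contains ':' with
          | false => exact absurd ((pvPieces_snd_nil_iff cs).mpr h) h2
          | true => rfl
        have hmem : ':' ∈ cs := by simpa using this
        cases hsnd : (pvPieces cs).2 with
        | nil => exact absurd hsnd h2
        | cons p ps => simp [hmem]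
    · by_cases hl : pvIsLocalChar c = true
      · have hl' : pvLocalpartChars.contains c = true := hl
        have hA : decide (c ∈ pvLocalpartChars) = true := by simpa using hl'
        simp only [pvPieces, if_neg hc, pvDropLocal, if_pos hl]
        simpa [hA] using ih
      · simp only [pvPieces, if_neg hc, pvDropLocal, if_neg hl]
        have hA : c ∉ pvLocalpartChars := by
          intro hm
          exact hl (by simpa [pvIsLocalChar, pvLocalpartChars] using hm)
        simp [hA, hc]

-- ===== VERDICT (by name: the statement is the Claim_ definition above) =====
theorem is_full_mxid_spec : Claim_equal_is_full_mxid := by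
  intro s _hdom hpre
  unfold Spec_is_full_mxid is_full_mxid is_full_mxid_alt
  cases hl : s.toList with
  | nil => exact absurd (String.toList_eq_nil_iff.mp hl) hpre
  | cons c0 rest =>
    have hget : PySem.Str.pyGet? s 0 = some c0 := by
      simp [PySem.Str.pyGet?_eq, hl, PySem.List.pyGet?, PySem.List.pyIdx?]
    rw [hget]
    by_cases h0 : c0 = '@'
    · subst h0
      rw [show PySem.List.slice ('@' :: rest) (some 1) none = rest from by
        rw [PySem.List.slice_from_one]; rfl]
      simp only [beq_self_eq_true, Bool.not_true, Bool.false_eq_true, if_false,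
        bne_self_eq_false, pvSplitOn_eq]
      have hidx : PySem.List.pyGetD ((pvPieces rest).1 :: (pvPieces rest).2) 0 []
          = (pvPieces rest).1 := by simp [pysem]
      rw [hidx, pvKey rest]
      cases hB : (match pvDropLocal rest with
        | [] => false
        | d :: tail => d == ':' && !(tail.contains ':')) <;> simp
    · have hb : (c0 == '@') = false := by simpa using h0
      clear hl hget _hdom hpre
      simp only [hb, bne, Bool.not_false, if_true]
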